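-- pv_equiv track=rewrite | github.com/suecharo/ToudaiInshi | 2010_winter/question_1_3.py | update_VAR
-- ===== SOURCE A (Python) =====
-- from copy import copy
--
-- def update_VAR(edge, d_edges, pre_V, pre_A, pre_R):
--     v_x, v_y = edge
--     d_edges[v_x].add(v_y)
--     now_V = copy(pre_V)
--     now_A = copy(pre_A)
--     now_R = copy(pre_R)
--     now_V.add(v_x)
--     now_V.add(v_y)
--     now_A.add(tuple(edge))
--     if v_x in pre_R and v_y not in pre_R:
--         now_R.add(v_y)
--         queue = d_edges[v_y]
--         while len(queue) != 0:
--             next_queue = []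
--             for v in queue:
--                 if v in now_R:
--                     continue
--                 else:
--                     now_R.add(v)
--                     for ele in d_edges[v]:
--                         next_queue.append(ele)
--             queue = next_queue
--
--     return d_edges, now_V, now_A, now_R
-- ===== SOURCE B (Python) =====
-- from copy import copy
--
-- def update_VAR(edge, d_edges, pre_V, pre_A, pre_R):
--     # Same in-place mutation of d_edges as A; reachability is recomputed by a
--     # round-based fixpoint over the whole edge dict instead of a BFS frontier.
--     v_x, v_y = edge
--     d_edges[v_x].add(v_y)
--     now_V = pre_V | {v_x, v_y}
--     now_A = pre_A | {(v_x, v_y)}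
--     now_R = set(pre_R)
--     if v_x in pre_R and v_y not in pre_R:
--         marked = {v_y}
--         changed = True
--         while changed:
--             changed = False
--             for u, succs in d_edges.items():
--                 if u in marked:
--                     for w in succs:
--                         if w not in marked and w not in pre_R:
--                             marked.add(w)
--                             changed = True
--         now_R |= marked
--     return d_edges, now_V, now_A, now_R
-- ===== Notes on version B (the rewrite author's own statement) =====
-- stated objective: alternative
-- what changed: A's layered BFS from the new vertex (frontier lists rebuilt level by level, indexing d_edges[v] for every newly reached v) is replaced by a round-based fixpoint: repeated full passes over d_edges.items() that mark successors of already-marked vertices until a pass changes nothing, with no frontier/queue and no d_edges[...] indexing during the search.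
import Mathlib
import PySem

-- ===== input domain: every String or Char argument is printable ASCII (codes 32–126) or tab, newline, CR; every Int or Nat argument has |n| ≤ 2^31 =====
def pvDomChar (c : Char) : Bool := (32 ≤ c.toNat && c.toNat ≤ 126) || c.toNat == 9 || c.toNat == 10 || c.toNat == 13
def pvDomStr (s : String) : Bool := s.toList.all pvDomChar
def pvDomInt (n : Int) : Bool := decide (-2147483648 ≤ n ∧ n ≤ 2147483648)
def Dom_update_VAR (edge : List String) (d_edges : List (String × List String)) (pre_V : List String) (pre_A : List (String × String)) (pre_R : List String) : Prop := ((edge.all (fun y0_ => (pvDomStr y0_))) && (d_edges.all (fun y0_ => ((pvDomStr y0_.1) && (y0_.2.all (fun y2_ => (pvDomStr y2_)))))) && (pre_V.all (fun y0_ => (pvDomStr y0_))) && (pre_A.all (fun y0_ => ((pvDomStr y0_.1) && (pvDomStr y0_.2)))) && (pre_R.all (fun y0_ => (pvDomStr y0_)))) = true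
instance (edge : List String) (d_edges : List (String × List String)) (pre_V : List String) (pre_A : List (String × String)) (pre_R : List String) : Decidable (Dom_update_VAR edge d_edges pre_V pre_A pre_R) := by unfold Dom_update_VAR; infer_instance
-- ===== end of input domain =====

-- B replaces A's layered BFS from the new vertex by a round-based fixpoint over the whole edge dict
-- (alternative algorithm, not faster).  Both Pythons mutate d_edges[v_x] in place in the same way;
-- the theorems are about the returned tuple.  Python set ITERATION order (hash order) is not
-- modelled: all set-valued components are order-insensitive Python sets, and both ports return the
-- propagated now_R in canonical sorted order (exact as a set).

-- ===== PORT A =====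

-- all distinct-element lists stored as dict values (the pool every queue element is drawn from)
def pvUniv (d : PySem.Dict String (List String)) : List String := d.items.flatMap (fun p => p.2)

-- termination-measure helper lemmas for the loops (cited in decreasing_by, so they live above the ports)
theorem pvGetD_mem_univ (d : PySem.Dict String (List String)) (v x : String)
    (hx : x ∈ d.getD v []) : x ∈ pvUniv d := by
  unfold PySem.Dict.getD PySem.Dict.get? at hx
  cases hfind : List.find? (fun p => p.1 == v) d.items with
  | none => rw [hfind] at hx; simp at hx
  | some p =>
    rw [hfind] at hx
    simp only [Option.map_some, Option.getD_some] at hx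
    have hp := List.mem_of_find?_eq_some hfind
    exact List.mem_flatMap.mpr ⟨p, hp, hx⟩

def pvMeasure (d : PySem.Dict String (List String)) (R queue : List String) : Nat × Nat :=
  (((pvUniv d ++ queue).toFinset \ R.toFinset).card, queue.length)

-- one BFS layer of A: state = (now_R, next_queue), folded over the current queue
def pvStep (d : PySem.Dict String (List String)) (st : List String × List String)
    (queue : List String) : List String × List String :=
  queue.foldl (fun st v =>
    if PySem.Set.contains st.1 v then st
    else (PySem.Set.add st.1 v, st.2 ++ d.getD v [])) st

theorem pvStep_mono (d : PySem.Dict String (List String)) (q : List String)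
    (st : List String × List String) (x : String) (hx : x ∈ st.1) : x ∈ (pvStep d st q).1 := by
  induction q generalizing st with
  | nil => exact hx
  | cons v qs ih =>
    simp only [pvStep, List.foldl_cons]
    split
    · exact ih st hx
    · exact ih _ ((PySem.Set.mem_add st.1 v x).mpr (Or.inl hx))

theorem pvStep_all (d : PySem.Dict String (List String)) (q : List String)
    (st : List String × List String) (v : String) (hv : v ∈ q) : v ∈ (pvStep d st q).1 := by
  induction q generalizing st with
  | nil => cases hv
  | cons w qs ih =>
    simp only [pvStep, List.foldl_cons]
    rcases List.mem_cons.mp hv with rfl | hv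
    · split
      · rename_i h
        exact pvStep_mono d qs st v ((PySem.Set.contains_iff st.1 v).mp h)
      · exact pvStep_mono d qs _ v ((PySem.Set.mem_add st.1 v v).mpr (Or.inr rfl))
    · split
      · exact ih st hv
      · exact ih _ hv

theorem pvStep_snd_mem (d : PySem.Dict String (List String)) (q : List String)
    (st : List String × List String) (x : String) (hx : x ∈ (pvStep d st q).2) :
    x ∈ st.2 ∨ x ∈ pvUniv d := by
  induction q generalizing st with
  | nil => exact Or.inl hx
  | cons v qs ih =>
    simp only [pvStep, List.foldl_cons] at hx
    split at hx
    · exact ih st hx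
    · rcases ih _ hx with h | h
      · rcases List.mem_append.mp h with h | h
        · exact Or.inl h
        · exact Or.inr (pvGetD_mem_univ d v x h)
      · exact Or.inr h

theorem pvStep_of_subset (d : PySem.Dict String (List String)) (q : List String)
    (st : List String × List String) (h : ∀ v ∈ q, v ∈ st.1) : pvStep d st q = st := by
  induction q generalizing st with
  | nil => rfl
  | cons v qs ih =>
    simp only [pvStep, List.foldl_cons]
    rw [if_pos ((PySem.Set.contains_iff st.1 v).mpr (h v List.mem_cons_self))]
    exact ih st (fun w hw => h w (List.mem_cons_of_mem _ hw))

-- A's while-loop over layers (literal transliteration of the nested loop)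
def bfsLayers (d : PySem.Dict String (List String)) (R queue : List String) : List String :=
  if h : queue = [] then R
  else
    let p := pvStep d (R, []) queue
    bfsLayers d p.1 p.2
termination_by pvMeasure d R queue
decreasing_by
  by_cases hall : ∀ v ∈ queue, v ∈ R
  · have hst := pvStep_of_subset d queue (R, []) hall
    simp only [pvMeasure, hst]
    have h1 : ((pvUniv d ++ ([] : List String)).toFinset \ R.toFinset).card
        = ((pvUniv d ++ queue).toFinset \ R.toFinset).card := by
      congr 1
      ext x
      simp only [Finset.mem_sdiff, List.mem_toFinset, List.mem_append, List.not_mem_nil, or_false]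
      exact ⟨fun hp => ⟨Or.inl hp.1, hp.2⟩,
        fun hp => ⟨hp.1.resolve_right (fun hq => hp.2 (hall x hq)), hp.2⟩⟩
    rw [h1]
    exact Prod.Lex.right _ (by simpa using List.length_pos_iff.mpr h)
  · push_neg at hall
    obtain ⟨v, hvq, hvR⟩ := hall
    simp only [pvMeasure]
    apply Prod.Lex.left
    apply Finset.card_lt_card
    constructor
    · intro x hx
      simp only [Finset.mem_sdiff, List.mem_toFinset, List.mem_append] at hx ⊢
      obtain ⟨hx1, hx2⟩ := hx
      refine ⟨?_, fun hxR => hx2 (pvStep_mono d queue (R, []) x hxR)⟩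
      rcases hx1 with h | h
      · exact Or.inl h
      · rcases pvStep_snd_mem d queue (R, []) x h with h | h
        · cases h
        · exact Or.inl h
    · intro hsub
      have hv1 : v ∈ (pvUniv d ++ queue).toFinset \ R.toFinset := by
        simp only [Finset.mem_sdiff, List.mem_toFinset, List.mem_append]
        exact ⟨Or.inr hvq, hvR⟩
      have h2 := hsub hv1
      simp only [Finset.mem_sdiff, List.mem_toFinset] at h2
      exact h2.2 (pvStep_all d queue (R, []) v hvq)

def update_VAR (edge : List String) (d_edges : List (String × List String)) (pre_V : List String) (pre_A : List (String × String)) (pre_R : List String) : (List (String × List String)) × List String × (List (String × String)) × List String :=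
  match edge with
  | [v_x, v_y] =>
    -- d_edges[v_x].add(v_y): in-place update of the set stored at v_x (Pre_ guarantees the key
    -- exists; where Python would raise KeyError the modify's [] default is never used)
    let d := (PySem.Dict.mk d_edges).modify v_x [] (fun s => PySem.Set.add s v_y)
    let now_V := PySem.Set.add (PySem.Set.add pre_V v_x) v_y
    let now_A := PySem.Set.add pre_A (v_x, v_y)
    let now_R :=
      if PySem.Set.contains pre_R v_x && !(PySem.Set.contains pre_R v_y) then
        -- now_R is a Python set (it has no observable order); returned in canonical sorted order
        PySem.List.sorted (bfsLayers d (PySem.Set.add pre_R v_y) (d.getD v_y [])) (fun x => x) false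
      else pre_R
    (d.items, now_V, now_A, now_R)
  | _ => (d_edges, pre_V, pre_A, pre_R)   -- v_x, v_y = edge raises ValueError: outside Pre_

-- ===== PORT B =====

-- the inner 'for w in succs' loop of Source B: state = (marked, changed)
def innerPass (blocked : List String) (st : List String × Bool) (ws : List String) :
    List String × Bool :=
  ws.foldl (fun st w =>
    if !(PySem.Set.contains st.1 w) && !(PySem.Set.contains blocked w) then
      (PySem.Set.add st.1 w, true)
    else st) st

-- one item of the 'for u, succs in d_edges.items()' loop
def stepItem (blocked : List String) (st : List String × Bool) (p : String × List String) :
    List String × Bool :=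
  if PySem.Set.contains st.1 p.1 then innerPass blocked st p.2 else st

-- one full pass of Source B's inner for-loop over d_edges.items()
def roundPass (d : PySem.Dict String (List String)) (blocked : List String)
    (st : List String × Bool) : List String × Bool :=
  d.items.foldl (stepItem blocked) st

-- structure of one inner loop: marked only grows, by fresh unblocked elements of ws
theorem innerPass_shape (blocked ws : List String) (st : List String × Bool) :
    ∃ t, (innerPass blocked st ws).1 = st.1 ++ t ∧ t.Nodup ∧
      (∀ x ∈ t, x ∈ ws ∧ x ∉ st.1 ∧ x ∉ blocked) ∧
      ((innerPass blocked st ws).2 = st.2 ∨ t ≠ []) := by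
  induction ws generalizing st with
  | nil => exact ⟨[], by simp [innerPass]⟩
  | cons w ws ih =>
    simp only [innerPass, List.foldl_cons]
    by_cases hc : (!(PySem.Set.contains st.1 w) && !(PySem.Set.contains blocked w)) = true
    · rw [if_pos hc]
      simp only [Bool.and_eq_true, Bool.not_eq_true'] at hc
      have hw1 : w ∉ st.1 := fun hm => by
        rw [(PySem.Set.contains_iff st.1 w).mpr hm] at hc; exact Bool.noConfusion hc.1
      have hw2 : w ∉ blocked := fun hm => by
        rw [(PySem.Set.contains_iff blocked w).mpr hm] at hc; exact Bool.noConfusion hc.2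
      obtain ⟨t, h1, h2, h3, _⟩ := ih (PySem.Set.add st.1 w, true)
      refine ⟨w :: t, ?_, ?_, ?_, Or.inr (by simp)⟩
      · rw [show innerPass blocked (PySem.Set.add st.1 w, true) ws
              = List.foldl _ (PySem.Set.add st.1 w, true) ws from rfl] at h1
        rw [h1, PySem.Set.add_of_not_mem hw1]
        simp
      · refine List.nodup_cons.mpr ⟨fun hwt => ?_, h2⟩
        exact (h3 w hwt).2.1 ((PySem.Set.mem_add st.1 w w).mpr (Or.inr rfl))
      · intro x hx
        rcases List.mem_cons.mp hx with rfl | hx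
        · exact ⟨List.mem_cons_self, hw1, hw2⟩
        · obtain ⟨ha, hb, hc'⟩ := h3 x hx
          exact ⟨List.mem_cons_of_mem _ ha,
            fun hm => hb ((PySem.Set.mem_add st.1 w x).mpr (Or.inl hm)), hc'⟩
    · rw [if_neg hc]
      obtain ⟨t, h1, h2, h3, h4⟩ := ih st
      exact ⟨t, h1, h2, fun x hx => ⟨List.mem_cons_of_mem _ (h3 x hx).1, (h3 x hx).2⟩, h4⟩

-- structure of a fold of stepItem over any item list
theorem passList_shape (blocked : List String) (l : List (String × List String))
    (st : List String × Bool) :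
    ∃ t, (l.foldl (stepItem blocked) st).1 = st.1 ++ t ∧ t.Nodup ∧
      (∀ x ∈ t, (∃ p ∈ l, x ∈ p.2) ∧ x ∉ st.1 ∧ x ∉ blocked) ∧
      ((l.foldl (stepItem blocked) st).2 = st.2 ∨ t ≠ []) := by
  induction l generalizing st with
  | nil => exact ⟨[], by simp⟩
  | cons p l ih =>
    simp only [List.foldl_cons]
    by_cases hc : PySem.Set.contains st.1 p.1 = true
    · rw [show stepItem blocked st p = innerPass blocked st p.2 from by
        unfold stepItem; rw [if_pos hc]]
      obtain ⟨t1, h11, h12, h13, h14⟩ := innerPass_shape blocked p.2 st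
      obtain ⟨t2, h21, h22, h23, h24⟩ := ih (innerPass blocked st p.2)
      refine ⟨t1 ++ t2, by rw [h21, h11, List.append_assoc], ?_, ?_, ?_⟩
      · refine List.Nodup.append h12 h22 (fun x hx1 hx2 => ?_)
        exact (h23 x hx2).2.1 (by rw [h11]; exact List.mem_append_right _ hx1)
      · intro x hx
        rcases List.mem_append.mp hx with hx | hx
        · obtain ⟨ha, hb, hc'⟩ := h13 x hx
          exact ⟨⟨p, List.mem_cons_self, ha⟩, hb, hc'⟩
        · obtain ⟨⟨q, hq, hxq⟩, hb, hc'⟩ := h23 x hx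
          refine ⟨⟨q, List.mem_cons_of_mem _ hq, hxq⟩,
            fun hm => hb (by rw [h11]; exact List.mem_append_left _ hm), hc'⟩
      · rcases h24 with h24 | h24
        · rcases h14 with h14 | h14
          · exact Or.inl (by rw [h24, h14])
          · exact Or.inr (by simp [h14])
        · exact Or.inr (by simp [h24])
    · rw [show stepItem blocked st p = st from by unfold stepItem; rw [if_neg hc]]
      obtain ⟨t, h1, h2, h3, h4⟩ := ih st
      exact ⟨t, h1, h2,
        fun x hx => ⟨⟨(h3 x hx).1.choose, List.mem_cons_of_mem _ (h3 x hx).1.choose_spec.1,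
          (h3 x hx).1.choose_spec.2⟩, (h3 x hx).2⟩, h4⟩

-- Source B's 'while changed' loop
def roundFix (d : PySem.Dict String (List String)) (blocked marked : List String) : List String :=
  let st := roundPass d blocked (marked, false)
  if st.2 = true then roundFix d blocked st.1 else st.1
termination_by ((pvUniv d).toFinset \ marked.toFinset).card
decreasing_by
  rename_i hst
  have hst2 : (List.foldl (stepItem blocked) (marked, false) d.items).2 = true := hst
  obtain ⟨t, h1, hnodup, h3, h4⟩ := passList_shape blocked d.items (marked, false)
  have ht : t ≠ [] := by
    rcases h4 with h4 | h4
    · exact Bool.noConfusion (hst2.symm.trans h4)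
    · exact h4
  obtain ⟨x0, hx0⟩ := List.exists_mem_of_ne_nil t ht
  have hs1 : (roundPass d blocked (marked, false)).1 = marked ++ t := h1
  apply Finset.card_lt_card
  constructor
  · intro y hy
    simp only [Finset.mem_sdiff, List.mem_toFinset] at hy ⊢
    refine ⟨hy.1, fun hm => hy.2 ?_⟩
    rw [hs1]
    exact List.mem_append_left _ hm
  · intro hsub
    have hx0u : x0 ∈ pvUniv d := by
      obtain ⟨⟨p, hp, hxp⟩, _, _⟩ := h3 x0 hx0
      exact List.mem_flatMap.mpr ⟨p, hp, hxp⟩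
    have hx0m : x0 ∉ marked := (h3 x0 hx0).2.1
    have h2 := hsub (by simp only [Finset.mem_sdiff, List.mem_toFinset]; exact ⟨hx0u, hx0m⟩)
    simp only [Finset.mem_sdiff, List.mem_toFinset] at h2
    exact h2.2 (by rw [hs1]; exact List.mem_append_right _ hx0)

def update_VAR_alt (edge : List String) (d_edges : List (String × List String)) (pre_V : List String) (pre_A : List (String × String)) (pre_R : List String) : (List (String × List String)) × List String × (List (String × String)) × List String :=
  -- v_x, v_y = edge: read the two components, guarded by the arity (ValueError is outside Pre_)
  if edge.length = 2 then
    let v_x := edge.getD 0 ""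
    let v_y := edge.getD 1 ""
    let d := (PySem.Dict.mk d_edges).modify v_x [] (fun s => PySem.Set.add s v_y)
    let now_V := PySem.Set.union pre_V [v_x, v_y]       -- pre_V | {v_x, v_y}
    let now_A := PySem.Set.union pre_A [(v_x, v_y)]     -- pre_A | {(v_x, v_y)}
    let now_R :=
      if PySem.Set.contains pre_R v_x && !(PySem.Set.contains pre_R v_y) then
        -- now_R = set(pre_R) | marked; a Python set, returned in canonical sorted order
        PySem.List.sorted (PySem.Set.union pre_R (roundFix d pre_R [v_y])) (fun x => x) false
      else pre_R
    (d.items, now_V, now_A, now_R)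
  else (d_edges, pre_V, pre_A, pre_R)

-- ===== PRECONDITION & SPEC =====

-- one step of successor expansion: add every unblocked successor of a vertex already in S
def pvExpand (d : PySem.Dict String (List String)) (blocked S : List String) : List String :=
  PySem.Set.update S
    ((d.items.filter (fun p => PySem.Set.contains S p.1)).flatMap
      (fun p => p.2.filter (fun w => !(PySem.Set.contains blocked w))))

-- the vertices reachable from `start` through edges avoiding `blocked`, as the n-fold iterate of
-- the monotone expansion step (on this finite graph, (pvUniv d).length + 1 iterations reach the
-- least fixpoint, i.e. plain graph reachability — a property of the input, not a run of a port)
def pvReach (d : PySem.Dict String (List String)) (blocked start : List String) :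
    Nat → List String
  | 0 => PySem.Set.ofList start
  | n + 1 => pvExpand d blocked (pvReach d blocked start n)

-- Pre_ excludes exactly the inputs on which the Python A raises: ValueError (edge is not a pair)
-- and KeyError (v_x not a key of d_edges, or — when the propagation guard fires — v_y or some
-- vertex reachable from v_y outside pre_R not a key of d_edges: exactly the vertices whose
-- successor set A reads), plus association lists with duplicate keys, which do not represent a
-- Python dict.
def Pre_update_VAR (edge : List String) (d_edges : List (String × List String)) (pre_V : List String) (pre_A : List (String × String)) (pre_R : List String) : Prop :=
  edge.length = 2 ∧
  (d_edges.map Prod.fst).Nodup ∧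
  (PySem.Dict.mk d_edges).contains (edge.getD 0 "") = true ∧
  ((edge.getD 0 "") ∈ pre_R ∧ (edge.getD 1 "") ∉ pre_R →
    (PySem.Dict.mk d_edges).contains (edge.getD 1 "") = true ∧
    ∀ v ∈ pvReach ((PySem.Dict.mk d_edges).modify (edge.getD 0 "") [] (fun s => PySem.Set.add s (edge.getD 1 "")))
        pre_R [edge.getD 1 ""]
        ((pvUniv ((PySem.Dict.mk d_edges).modify (edge.getD 0 "") [] (fun s => PySem.Set.add s (edge.getD 1 "")))).length + 1),
      (PySem.Dict.mk d_edges).contains v = true)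
instance (edge : List String) (d_edges : List (String × List String)) (pre_V : List String) (pre_A : List (String × String)) (pre_R : List String) : Decidable (Pre_update_VAR edge d_edges pre_V pre_A pre_R) := by unfold Pre_update_VAR; infer_instance

def pvWitness_update_VAR : List String × (List (String × List String)) × List String × (List (String × String)) × List String :=
  (["a", "b"], [("a", []), ("b", ["c"]), ("c", [])], ["a"], [], ["a"])

def Spec_update_VAR (edge : List String) (d_edges : List (String × List String)) (pre_V : List String) (pre_A : List (String × String)) (pre_R : List String) (out : (List (String × List String)) × List String × (List (String × String)) × List String) : Prop := out = update_VAR_alt edge d_edges pre_V pre_A pre_R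
instance (edge : List String) (d_edges : List (String × List String)) (pre_V : List String) (pre_A : List (String × String)) (pre_R : List String) (out : (List (String × List String)) × List String × (List (String × String)) × List String) : Decidable (Spec_update_VAR edge d_edges pre_V pre_A pre_R out) := by unfold Spec_update_VAR; infer_instance

-- ===== CLAIM (what is proved, stated in full; the proofs are below) =====
def Claim_equal_update_VAR : Prop := ∀ (edge : List String) (d_edges : List (String × List String)) (pre_V : List String) (pre_A : List (String × String)) (pre_R : List String), Dom_update_VAR edge d_edges pre_V pre_A pre_R → Pre_update_VAR edge d_edges pre_V pre_A pre_R → Spec_update_VAR edge d_edges pre_V pre_A pre_R (update_VAR edge d_edges pre_V pre_A pre_R)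

-- ===== LEMMAS AND PROOFS =====

-- reachability with blocked SOURCES: a chain q = u0 → … → uk = x whose step sources avoid R
inductive RchS (d : PySem.Dict String (List String)) (R : List String) : String → String → Prop
  | refl (q : String) : RchS d R q q
  | tail {q u w : String} : RchS d R q u → u ∉ R → w ∈ d.getD u [] → RchS d R q w

theorem RchS_trans (d : PySem.Dict String (List String)) (R : List String) {a b c : String}
    (h1 : RchS d R a b) (h2 : RchS d R b c) : RchS d R a c := by
  induction h2 with
  | refl => exact h1
  | tail _ hu hw ih => exact RchS.tail ih hu hw

theorem RchS_start_mem (d : PySem.Dict String (List String)) (R : List String) {q x : String}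
    (h : RchS d R q x) (hq : q ∈ R) : x = q := by
  induction h with
  | refl => rfl
  | tail _ hu _ ih => rw [ih] at hu; exact absurd hq hu

theorem RchS_anti (d : PySem.Dict String (List String)) {R R' : List String}
    (hsub : ∀ y, y ∈ R → y ∈ R') {q x : String} (h : RchS d R' q x) : RchS d R q x := by
  induction h with
  | refl => exact RchS.refl _
  | tail _ hu hw ih => exact RchS.tail ih (fun hm => hu (hsub _ hm)) hw

theorem RchS_shortcut (d : PySem.Dict String (List String)) (R : List String) (v : String)
    {q x : String} (h : RchS d R q x) :
    RchS d (PySem.Set.add R v) q x ∨ x = v ∨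
      ∃ w ∈ d.getD v [], RchS d (PySem.Set.add R v) w x := by
  induction h with
  | refl => exact Or.inl (RchS.refl _)
  | @tail u w h1 hu hw ih =>
    by_cases huv : u = v
    · subst huv
      exact Or.inr (Or.inr ⟨w, hw, RchS.refl _⟩)
    · have hu' : u ∉ PySem.Set.add R v := fun hm => by
        rcases (PySem.Set.mem_add R v u).mp hm with hm | hm
        exacts [hu hm, huv hm]
      rcases ih with ih | ih | ⟨w', hw', ih⟩
      · exact Or.inl (RchS.tail ih hu' hw)
      · exact absurd ih huv
      · exact Or.inr (Or.inr ⟨w', hw', RchS.tail ih hu' hw⟩)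

-- A's BFS flattened to a single FIFO worklist (proof-side device, used by neither port)
def reachFlat (d : PySem.Dict String (List String)) (R queue : List String) : List String :=
  match queue with
  | [] => R
  | v :: rest =>
    if PySem.Set.contains R v then reachFlat d R rest
    else reachFlat d (PySem.Set.add R v) (rest ++ d.getD v [])
termination_by pvMeasure d R queue
decreasing_by
  · rename_i hv
    have hvm : v ∈ R := (PySem.Set.contains_iff R v).mp hv
    simp only [pvMeasure]
    have h1 : ((pvUniv d ++ rest).toFinset \ R.toFinset).card
        = ((pvUniv d ++ v :: rest).toFinset \ R.toFinset).card := by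
      congr 1
      ext x
      simp only [Finset.mem_sdiff, List.mem_toFinset, List.mem_append, List.mem_cons]
      constructor
      · rintro ⟨h | h, hr⟩
        exacts [⟨Or.inl h, hr⟩, ⟨Or.inr (Or.inr h), hr⟩]
      · rintro ⟨h | (rfl | h), hr⟩
        exacts [⟨Or.inl h, hr⟩, absurd hvm hr, ⟨Or.inr h, hr⟩]
    rw [h1]
    exact Prod.Lex.right _ (by simp)
  · rename_i hv
    have hvR : v ∉ R := fun hm => hv ((PySem.Set.contains_iff R v).mpr hm)
    simp only [pvMeasure]
    apply Prod.Lex.left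
    apply Finset.card_lt_card
    constructor
    · intro x hx
      simp only [Finset.mem_sdiff, List.mem_toFinset, List.mem_append, List.mem_cons] at hx ⊢
      obtain ⟨hx1, hx2⟩ := hx
      refine ⟨?_, fun hm => hx2 ((PySem.Set.mem_add R v x).mpr (Or.inl hm))⟩
      rcases hx1 with h | h
      · exact Or.inl h
      · rcases h with h | h
        · exact Or.inr (Or.inr h)
        · exact Or.inl (pvGetD_mem_univ d v x h)
    · intro hsub
      have hv1 : v ∈ (pvUniv d ++ v :: rest).toFinset \ R.toFinset := by
        simp [hvR]
      have h2 := hsub hv1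
      simp only [Finset.mem_sdiff, List.mem_toFinset] at h2
      exact h2.2 ((PySem.Set.mem_add R v v).mpr (Or.inr rfl))

-- one step of the layer fold, condition resolved
theorem pvStep_cons_pos (d : PySem.Dict String (List String)) (R a : List String)
    (v : String) (qs : List String) (hv : PySem.Set.contains R v = true) :
    pvStep d (R, a) (v :: qs) = pvStep d (R, a) qs := by
  have hm : v ∈ R := (PySem.Set.contains_iff R v).mp hv
  simp [pvStep, List.foldl_cons, hm]

theorem pvStep_cons_neg (d : PySem.Dict String (List String)) (R a : List String)
    (v : String) (qs : List String) (hv : ¬ PySem.Set.contains R v = true) :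
    pvStep d (R, a) (v :: qs) = pvStep d (PySem.Set.add R v, a ++ d.getD v []) qs := by
  have hm : v ∉ R := fun h => hv ((PySem.Set.contains_iff R v).mpr h)
  simp [pvStep, List.foldl_cons, hm]

-- factor the next_queue accumulator out of one BFS layer
theorem pvStep_acc (d : PySem.Dict String (List String)) (q : List String) (R a : List String) :
    pvStep d (R, a) q = ((pvStep d (R, []) q).1, a ++ (pvStep d (R, []) q).2) := by
  induction q generalizing R a with
  | nil => simp [pvStep]
  | cons v qs ih =>
    by_cases hv : PySem.Set.contains R v
    · rw [pvStep_cons_pos d R a v qs hv, pvStep_cons_pos d R [] v qs hv]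
      exact ih R a
    · rw [pvStep_cons_neg d R a v qs hv, pvStep_cons_neg d R [] v qs hv]
      rw [ih (PySem.Set.add R v) (a ++ d.getD v []), ih (PySem.Set.add R v) ([] ++ d.getD v [])]
      simp [List.append_assoc]

-- the flat worklist processes exactly the concatenation of A's layers
theorem pv_bridge (d : PySem.Dict String (List String)) (q : List String) :
    ∀ R extra, reachFlat d R (q ++ extra)
      = reachFlat d (pvStep d (R, []) q).1 (extra ++ (pvStep d (R, []) q).2) := by
  induction q with
  | nil => intro R extra; simp [pvStep]
  | cons v qs ih =>
    intro R extra
    by_cases hv : PySem.Set.contains R v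
    · rw [List.cons_append, reachFlat, if_pos hv, pvStep_cons_pos d R [] v qs hv]
      exact ih R extra
    · rw [List.cons_append, reachFlat, if_neg hv, pvStep_cons_neg d R [] v qs hv]
      rw [List.append_assoc]
      rw [ih (PySem.Set.add R v) (extra ++ d.getD v [])]
      rw [pvStep_acc d qs (PySem.Set.add R v) ([] ++ d.getD v [])]
      simp [List.append_assoc]

theorem bfsLayers_eq_reachFlat (d : PySem.Dict String (List String)) (R queue : List String) :
    bfsLayers d R queue = reachFlat d R queue := by
  induction R, queue using bfsLayers.induct d with
  | case1 R => rw [bfsLayers]; simp [reachFlat]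
  | case2 R queue h p ih =>
    rw [bfsLayers]
    rw [dif_neg h]
    have hb := pv_bridge d queue R []
    rw [List.append_nil] at hb
    rw [hb]
    simpa using ih

-- the flat worklist only appends fresh vertices to R
theorem reachFlat_shape (d : PySem.Dict String (List String)) (R queue : List String) :
    ∃ t, reachFlat d R queue = R ++ t ∧ t.Nodup ∧ ∀ x ∈ t, x ∉ R := by
  induction R, queue using reachFlat.induct d with
  | case1 R => exact ⟨[], by simp [reachFlat]⟩
  | case2 R v rest hv ih =>
    rw [reachFlat, if_pos hv]
    exact ih
  | case3 R v rest hv ih =>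
    rw [reachFlat, if_neg hv]
    have hvR : v ∉ R := fun hm => hv ((PySem.Set.contains_iff R v).mpr hm)
    obtain ⟨t, h1, h2, h3⟩ := ih
    refine ⟨v :: t, ?_, ?_, ?_⟩
    · rw [h1, PySem.Set.add_of_not_mem hvR]
      simp
    · exact List.nodup_cons.mpr
        ⟨fun hvt => h3 v hvt ((PySem.Set.mem_add R v v).mpr (Or.inr rfl)), h2⟩
    · intro x hx
      rcases List.mem_cons.mp hx with rfl | hx
      · exact hvR
      · exact fun hm => h3 x hx ((PySem.Set.mem_add R v x).mpr (Or.inl hm))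

-- membership in the flat worklist closure = blocked-source reachability from the queue
theorem mem_reachFlat (d : PySem.Dict String (List String)) (R queue : List String) (x : String) :
    x ∈ reachFlat d R queue ↔ x ∈ R ∨ ∃ q ∈ queue, RchS d R q x := by
  induction R, queue using reachFlat.induct d with
  | case1 R => simp [reachFlat]
  | case2 R v rest hv ih =>
    rw [reachFlat, if_pos hv, ih]
    constructor
    · rintro (h | ⟨q, hq, hr⟩)
      · exact Or.inl h
      · exact Or.inr ⟨q, List.mem_cons_of_mem _ hq, hr⟩
    · rintro (h | ⟨q, hq, hr⟩)
      · exact Or.inl h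
      · rcases List.mem_cons.mp hq with rfl | hq
        · exact Or.inl ((RchS_start_mem d R hr ((PySem.Set.contains_iff R q).mp hv)) ▸
            ((PySem.Set.contains_iff R q).mp hv))
        · exact Or.inr ⟨q, hq, hr⟩
  | case3 R v rest hv ih =>
    rw [reachFlat, if_neg hv, ih]
    have hvR : v ∉ R := fun hm => hv ((PySem.Set.contains_iff R v).mpr hm)
    have hsub : ∀ y, y ∈ R → y ∈ PySem.Set.add R v :=
      fun y hy => (PySem.Set.mem_add R v y).mpr (Or.inl hy)
    constructor
    · rintro (h | ⟨q, hq, hr⟩)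
      · rcases (PySem.Set.mem_add R v x).mp h with h | rfl
        · exact Or.inl h
        · exact Or.inr ⟨x, List.mem_cons_self, RchS.refl _⟩
      · rcases List.mem_append.mp hq with hq | hq
        · exact Or.inr ⟨q, List.mem_cons_of_mem _ hq, RchS_anti d hsub hr⟩
        · refine Or.inr ⟨v, List.mem_cons_self,
            RchS_trans d R (RchS.tail (RchS.refl v) hvR hq) (RchS_anti d hsub hr)⟩
    · rintro (h | ⟨q, hq, hr⟩)
      · exact Or.inl (hsub x h)
      · rcases List.mem_cons.mp hq with hq' | hq
        · rw [hq'] at hr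
          rcases RchS_shortcut d R v hr with h' | hxv | ⟨w, hw, h'⟩
          · have hx := RchS_start_mem d (PySem.Set.add R v) h'
              ((PySem.Set.mem_add R v v).mpr (Or.inr rfl))
            exact Or.inl (hx ▸ (PySem.Set.mem_add R v v).mpr (Or.inr rfl))
          · exact Or.inl ((PySem.Set.mem_add R v x).mpr (Or.inr hxv))
          · exact Or.inr ⟨w, List.mem_append_right _ hw, h'⟩
        · rcases RchS_shortcut d R v hr with h' | hxv | ⟨w, hw, h'⟩
          · exact Or.inr ⟨q, List.mem_append_left _ hq, h'⟩
          · exact Or.inl ((PySem.Set.mem_add R v x).mpr (Or.inr hxv))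
          · exact Or.inr ⟨w, List.mem_append_right _ hw, h'⟩

-- reachability with blocked TARGETS from a single source (B's closure invariant)
inductive Rb (d : PySem.Dict String (List String)) (B : List String) (s : String) : String → Prop
  | base : Rb d B s s
  | step {u w : String} : Rb d B s u → w ∈ d.getD u [] → w ∉ B → Rb d B s w

theorem Rb_not_blocked (d : PySem.Dict String (List String)) (B : List String) (s : String)
    (hs : s ∉ B) {x : String} (h : Rb d B s x) : x ∉ B := by
  induction h with
  | base => exact hs
  | step _ _ hw _ => exact hw

theorem RchS_to_Rb (d : PySem.Dict String (List String)) (pre_R : List String) (v_y : String)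
    {q x : String} (hq : q ∈ d.getD v_y [])
    (h : RchS d (PySem.Set.add pre_R v_y) q x) : x ∈ pre_R ∨ Rb d pre_R v_y x := by
  induction h with
  | refl =>
    by_cases hx : q ∈ pre_R
    · exact Or.inl hx
    · exact Or.inr (Rb.step Rb.base hq hx)
  | @tail u w h1 hu hw ih =>
    rcases ih with ih | ih
    · exact absurd ((PySem.Set.mem_add pre_R v_y u).mpr (Or.inl ih)) hu
    · by_cases hwB : w ∈ pre_R
      · exact Or.inl hwB
      · exact Or.inr (Rb.step ih hw hwB)

theorem Rb_to_RchS (d : PySem.Dict String (List String)) (pre_R : List String) (v_y : String)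
    (hvy : v_y ∉ pre_R) {x : String} (h : Rb d pre_R v_y x) :
    x = v_y ∨ ∃ q ∈ d.getD v_y [], RchS d (PySem.Set.add pre_R v_y) q x := by
  induction h with
  | base => exact Or.inl rfl
  | @step u w h1 hw hwB ih =>
    by_cases hwv : w = v_y
    · exact Or.inl hwv
    · rcases ih with rfl | ⟨q, hq, hr⟩
      · exact Or.inr ⟨w, hw, RchS.refl _⟩
      · by_cases huv : u = v_y
        · subst huv; exact Or.inr ⟨w, hw, RchS.refl _⟩
        · have hu : u ∉ PySem.Set.add pre_R v_y := fun hm => by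
            rcases (PySem.Set.mem_add pre_R v_y u).mp hm with hm | hm
            exacts [absurd hm (Rb_not_blocked d pre_R v_y hvy h1), huv hm]
          exact Or.inr ⟨q, hq, RchS.tail hr hu hw⟩

-- ------- B-side: properties of one pass and of the fixpoint loop -------

theorem innerPass_sticky (blocked ws : List String) (st : List String × Bool)
    (h : st.2 = true) : (innerPass blocked st ws).2 = true := by
  induction ws generalizing st with
  | nil => exact h
  | cons w ws ih =>
    simp only [innerPass, List.foldl_cons]
    split
    · exact ih _ rfl
    · exact ih st h

theorem innerPass_nochange (blocked ws : List String) (st : List String × Bool)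
    (h : (innerPass blocked st ws).2 = false) :
    innerPass blocked st ws = st ∧ ∀ w ∈ ws, w ∈ st.1 ∨ w ∈ blocked := by
  induction ws generalizing st with
  | nil => exact ⟨rfl, by simp⟩
  | cons w ws ih =>
    simp only [innerPass, List.foldl_cons] at h ⊢
    by_cases hc : (!(PySem.Set.contains st.1 w) && !(PySem.Set.contains blocked w)) = true
    · rw [if_pos hc] at h
      exact absurd (innerPass_sticky blocked ws _ rfl) (by
        rw [show List.foldl _ (PySem.Set.add st.1 w, true) ws
            = innerPass blocked (PySem.Set.add st.1 w, true) ws from rfl] at h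
        rw [h]; exact Bool.noConfusion)
    · rw [if_neg hc] at h ⊢
      obtain ⟨h1, h2⟩ := ih st h
      refine ⟨h1, fun w' hw' => ?_⟩
      rcases List.mem_cons.mp hw' with rfl | hw'
      · simp only [Bool.and_eq_true, Bool.not_eq_true'] at hc
        rcases not_and_or.mp hc with hc | hc
        · exact Or.inl ((PySem.Set.contains_iff st.1 w').mp (Bool.ne_false_iff.mp hc))
        · exact Or.inr ((PySem.Set.contains_iff blocked w').mp (Bool.ne_false_iff.mp hc))
      · exact h2 w' hw'

theorem passList_sticky (blocked : List String) (l : List (String × List String))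
    (st : List String × Bool) (h : st.2 = true) :
    (l.foldl (stepItem blocked) st).2 = true := by
  induction l generalizing st with
  | nil => exact h
  | cons p l ih =>
    simp only [List.foldl_cons]
    unfold stepItem
    split
    · exact ih _ (innerPass_sticky blocked p.2 st h)
    · exact ih st h

theorem passList_nochange (blocked : List String) (l : List (String × List String))
    (st : List String × Bool) (h : (l.foldl (stepItem blocked) st).2 = false) :
    l.foldl (stepItem blocked) st = st ∧
      ∀ p ∈ l, p.1 ∈ st.1 → ∀ w ∈ p.2, w ∈ st.1 ∨ w ∈ blocked := by
  induction l generalizing st with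
  | nil => exact ⟨rfl, by simp⟩
  | cons p l ih =>
    simp only [List.foldl_cons] at h ⊢
    by_cases hc : PySem.Set.contains st.1 p.1 = true
    · rw [show stepItem blocked st p = innerPass blocked st p.2 from by
        unfold stepItem; rw [if_pos hc]] at h ⊢
      have hin2 : (innerPass blocked st p.2).2 = false := by
        rcases Bool.eq_false_or_eq_true (innerPass blocked st p.2).2 with h' | h'
        · exact absurd (passList_sticky blocked l _ h') (by rw [h]; exact Bool.noConfusion)
        · exact h'
      obtain ⟨hin1, hinp⟩ := innerPass_nochange blocked p.2 st hin2
      rw [hin1] at h ⊢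
      obtain ⟨h1, h2⟩ := ih st h
      refine ⟨h1, fun q hq hq1 w hw => ?_⟩
      rcases List.mem_cons.mp hq with rfl | hq
      · exact hinp w hw
      · exact h2 q hq hq1 w hw
    · rw [show stepItem blocked st p = st from by unfold stepItem; rw [if_neg hc]] at h ⊢
      obtain ⟨h1, h2⟩ := ih st h
      refine ⟨h1, fun q hq hq1 w hw => ?_⟩
      rcases List.mem_cons.mp hq with rfl | hq
      · exact absurd ((PySem.Set.contains_iff st.1 q.1).mpr hq1) hc
      · exact h2 q hq hq1 w hw

theorem passList_sound (d : PySem.Dict String (List String)) (blocked : List String)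
    (P : String → Prop)
    (hstep : ∀ u w, P u → w ∈ d.getD u [] → w ∉ blocked → P w)
    (hnd : d.keys.Nodup) (l : List (String × List String)) (hl : ∀ p ∈ l, p ∈ d.items)
    (st : List String × Bool) (hP : ∀ x ∈ st.1, P x) :
    ∀ x ∈ (l.foldl (stepItem blocked) st).1, P x := by
  induction l generalizing st with
  | nil => exact hP
  | cons p l ih =>
    simp only [List.foldl_cons]
    by_cases hc : PySem.Set.contains st.1 p.1 = true
    · rw [show stepItem blocked st p = innerPass blocked st p.2 from by
        unfold stepItem; rw [if_pos hc]]
      refine ih (fun q hq => hl q (List.mem_cons_of_mem _ hq)) _ ?_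
      obtain ⟨t, h1, _, h3, _⟩ := innerPass_shape blocked p.2 st
      rw [h1]
      intro x hx
      rcases List.mem_append.mp hx with hx | hx
      · exact hP x hx
      · obtain ⟨ha, _, hc'⟩ := h3 x hx
        refine hstep p.1 x (hP p.1 ((PySem.Set.contains_iff st.1 p.1).mp hc)) ?_ hc'
        rw [PySem.Dict.getD_of_mem_items d (hl p List.mem_cons_self) hnd]
        exact ha
    · rw [show stepItem blocked st p = st from by unfold stepItem; rw [if_neg hc]]
      exact ih (fun q hq => hl q (List.mem_cons_of_mem _ hq)) st hP

theorem roundFix_sub (d : PySem.Dict String (List String)) (blocked marked : List String) :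
    ∀ x ∈ marked, x ∈ roundFix d blocked marked := by
  induction marked using roundFix.induct d blocked with
  | case1 marked st hst ih =>
    have hst' : (roundPass d blocked (marked, false)).2 = true := hst
    intro x hx
    rw [roundFix]
    show x ∈ (if (roundPass d blocked (marked, false)).2 = true
        then roundFix d blocked (roundPass d blocked (marked, false)).1
        else (roundPass d blocked (marked, false)).1)
    rw [if_pos hst']
    apply ih
    obtain ⟨t, h1, _, _, _⟩ := passList_shape blocked d.items (marked, false)
    show x ∈ (d.items.foldl (stepItem blocked) (marked, false)).1
    rw [h1]
    exact List.mem_append_left _ hx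
  | case2 marked st hst =>
    have hst' : ¬ (roundPass d blocked (marked, false)).2 = true := hst
    intro x hx
    rw [roundFix]
    show x ∈ (if (roundPass d blocked (marked, false)).2 = true
        then roundFix d blocked (roundPass d blocked (marked, false)).1
        else (roundPass d blocked (marked, false)).1)
    rw [if_neg hst']
    obtain ⟨t, h1, _, _, _⟩ := passList_shape blocked d.items (marked, false)
    show x ∈ (d.items.foldl (stepItem blocked) (marked, false)).1
    rw [h1]
    exact List.mem_append_left _ hx

theorem roundFix_sound (d : PySem.Dict String (List String)) (blocked : List String)
    (P : String → Prop)
    (hstep : ∀ u w, P u → w ∈ d.getD u [] → w ∉ blocked → P w)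
    (hnd : d.keys.Nodup) (marked : List String) :
    (∀ x ∈ marked, P x) → ∀ x ∈ roundFix d blocked marked, P x := by
  induction marked using roundFix.induct d blocked with
  | case1 marked st hst ih =>
    intro hP
    have hst' : (roundPass d blocked (marked, false)).2 = true := hst
    rw [roundFix]
    show ∀ x ∈ (if (roundPass d blocked (marked, false)).2 = true
        then roundFix d blocked (roundPass d blocked (marked, false)).1
        else (roundPass d blocked (marked, false)).1), P x
    rw [if_pos hst']
    exact ih (passList_sound d blocked P hstep hnd d.items (fun p hp => hp) (marked, false) hP)
  | case2 marked st hst =>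
    intro hP
    have hst' : ¬ (roundPass d blocked (marked, false)).2 = true := hst
    rw [roundFix]
    show ∀ x ∈ (if (roundPass d blocked (marked, false)).2 = true
        then roundFix d blocked (roundPass d blocked (marked, false)).1
        else (roundPass d blocked (marked, false)).1), P x
    rw [if_neg hst']
    exact passList_sound d blocked P hstep hnd d.items (fun p hp => hp) (marked, false) hP

theorem roundFix_stable (d : PySem.Dict String (List String)) (blocked marked : List String) :
    ∀ p ∈ d.items, p.1 ∈ roundFix d blocked marked →
      ∀ w ∈ p.2, w ∈ roundFix d blocked marked ∨ w ∈ blocked := by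
  induction marked using roundFix.induct d blocked with
  | case1 marked st hst ih =>
    have hst' : (roundPass d blocked (marked, false)).2 = true := hst
    have hrw : roundFix d blocked marked
        = roundFix d blocked (roundPass d blocked (marked, false)).1 := by
      rw [roundFix]
      show (if (roundPass d blocked (marked, false)).2 = true
          then roundFix d blocked (roundPass d blocked (marked, false)).1
          else (roundPass d blocked (marked, false)).1) = _
      rw [if_pos hst']
    rw [hrw]
    exact ih
  | case2 marked st hst =>
    have hst' : ¬ (roundPass d blocked (marked, false)).2 = true := hst
    have hst2 : (d.items.foldl (stepItem blocked) (marked, false)).2 = false := by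
      rcases Bool.eq_false_or_eq_true (roundPass d blocked (marked, false)).2 with h | h
      · exact absurd h hst'
      · exact h
    obtain ⟨hfix, hstab⟩ := passList_nochange blocked d.items (marked, false) hst2
    have hrw : roundFix d blocked marked = marked := by
      rw [roundFix]
      show (if (roundPass d blocked (marked, false)).2 = true
          then roundFix d blocked (roundPass d blocked (marked, false)).1
          else (roundPass d blocked (marked, false)).1) = _
      rw [if_neg hst']
      show (d.items.foldl (stepItem blocked) (marked, false)).1 = marked
      rw [hfix]
    rw [hrw]
    exact fun p hp hp1 w hw => hstab p hp hp1 w hw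
  
theorem roundFix_complete (d : PySem.Dict String (List String)) (blocked marked : List String)
    (s : String) (hs : s ∈ marked) {x : String} (h : Rb d blocked s x) :
    x ∈ roundFix d blocked marked := by
  induction h with
  | base => exact roundFix_sub d blocked marked s hs
  | @step u w h1 hw hwB ih =>
    rcases hget : d.get? u with _ | sv
    · rw [PySem.Dict.getD_eq_get?_getD, hget] at hw
      simp at hw
    · rw [PySem.Dict.getD_eq_get?_getD, hget] at hw
      simp only [Option.getD_some] at hw
      have hp : (u, sv) ∈ d.items := PySem.Dict.mem_items_of_get?_eq_some d hget
      rcases roundFix_stable d blocked marked (u, sv) hp ih w hw with h' | h'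
      · exact h'
      · exact absurd h' hwB

theorem mem_roundFix (d : PySem.Dict String (List String)) (blocked : List String) (s : String)
    (hnd : d.keys.Nodup) (x : String) : x ∈ roundFix d blocked [s] ↔ Rb d blocked s x := by
  constructor
  · intro hx
    refine roundFix_sound d blocked (Rb d blocked s)
      (fun u w hu hw hwB => Rb.step hu hw hwB) hnd [s] ?_ x hx
    intro y hy
    rw [List.mem_singleton.mp hy]
    exact Rb.base
  · exact roundFix_complete d blocked [s] s List.mem_cons_self

-- set(s); s.update(xs) only appends the fresh elements of xs, deduplicated in order
theorem foldl_add_shape (xs s : List String) :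
    ∃ t, xs.foldl PySem.Set.add s = s ++ t ∧ t.Nodup ∧ ∀ x, x ∈ t ↔ x ∈ xs ∧ x ∉ s := by
  induction xs generalizing s with
  | nil => exact ⟨[], by simp⟩
  | cons a xs ih =>
    simp only [List.foldl_cons]
    by_cases ha : a ∈ s
    · rw [PySem.Set.add_of_mem ha]
      obtain ⟨t, h1, h2, h3⟩ := ih s
      refine ⟨t, h1, h2, fun x => ?_⟩
      rw [h3]
      constructor
      · rintro ⟨hx1, hx2⟩
        exact ⟨List.mem_cons_of_mem _ hx1, hx2⟩
      · rintro ⟨hx1, hx2⟩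
        rcases List.mem_cons.mp hx1 with rfl | hx1
        · exact absurd ha hx2
        · exact ⟨hx1, hx2⟩
    · rw [PySem.Set.add_of_not_mem ha]
      obtain ⟨t, h1, h2, h3⟩ := ih (s ++ [a])
      refine ⟨a :: t, by rw [h1]; simp, ?_, fun x => ?_⟩
      · refine List.nodup_cons.mpr ⟨fun hat => ?_, h2⟩
        exact ((h3 a).mp hat).2 (List.mem_append_right _ (List.mem_singleton.mpr rfl))
      · constructor
        · intro hx
          rcases List.mem_cons.mp hx with rfl | hx
          · exact ⟨List.mem_cons_self, ha⟩
          · obtain ⟨hx1, hx2⟩ := (h3 x).mp hx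
            exact ⟨List.mem_cons_of_mem _ hx1, fun hm => hx2 (List.mem_append_left _ hm)⟩
        · rintro ⟨hx1, hx2⟩
          rcases List.mem_cons.mp hx1 with rfl | hx1
          · exact List.mem_cons_self
          · by_cases hxa : x = a
            · exact hxa ▸ List.mem_cons_self
            · refine List.mem_cons_of_mem _ ((h3 x).mpr ⟨hx1, fun hm => ?_⟩)
              rcases List.mem_append.mp hm with hm | hm
              exacts [hx2 hm, hxa (List.mem_singleton.mp hm)]

theorem union_shape (s xs : List String) :
    ∃ t, PySem.Set.union s xs = s ++ t ∧ t.Nodup ∧ ∀ x, x ∈ t ↔ x ∈ xs ∧ x ∉ s := by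
  have h : PySem.Set.union s xs = xs.foldl PySem.Set.add s := by
    simp [PySem.Set.union, PySem.Set.update]
  rw [h]
  exact foldl_add_shape xs s

-- the heart of the claim: BFS-from-v_y and the round fixpoint mark the same set, so the two
-- canonical sorted representations of now_R coincide
theorem nowR_eq (d : PySem.Dict String (List String)) (pre_R : List String) (v_y : String)
    (hvy : v_y ∉ pre_R) (hnd : d.keys.Nodup) :
    PySem.List.sorted (bfsLayers d (PySem.Set.add pre_R v_y) (d.getD v_y [])) (fun x => x) false
      = PySem.List.sorted (PySem.Set.union pre_R (roundFix d pre_R [v_y])) (fun x => x) false := by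
  apply PySem.List.sorted_eq_sorted_of_perm _ _ _ (fun a b h => h)
  rw [bfsLayers_eq_reachFlat]
  obtain ⟨tA, hA, hAnd, hAdisj⟩ := reachFlat_shape d (PySem.Set.add pre_R v_y) (d.getD v_y [])
  obtain ⟨tB, hB, hBnd, hBmem⟩ := union_shape pre_R (roundFix d pre_R [v_y])
  rw [hA, hB, PySem.Set.add_of_not_mem hvy, List.append_assoc]
  refine List.Perm.append_left pre_R ?_
  rw [List.singleton_append]
  have hnd1 : (v_y :: tA).Nodup := List.nodup_cons.mpr
    ⟨fun hm => hAdisj v_y hm ((PySem.Set.mem_add pre_R v_y v_y).mpr (Or.inr rfl)), hAnd⟩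
  rw [List.perm_ext_iff_of_nodup hnd1 hBnd]
  intro a
  constructor
  · intro ha
    rcases List.mem_cons.mp ha with rfl | ha
    · exact (hBmem a).mpr ⟨(mem_roundFix d pre_R a hnd a).mpr Rb.base, hvy⟩
    · have haR0 : a ∉ PySem.Set.add pre_R v_y := hAdisj a ha
      have hmem : a ∈ reachFlat d (PySem.Set.add pre_R v_y) (d.getD v_y []) := by
        rw [hA]; exact List.mem_append_right _ ha
      rcases (mem_reachFlat d _ _ a).mp hmem with h | ⟨q, hq, hr⟩
      · exact absurd h haR0
      · rcases RchS_to_Rb d pre_R v_y hq hr with h | h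
        · exact absurd ((PySem.Set.mem_add pre_R v_y a).mpr (Or.inl h)) haR0
        · exact (hBmem a).mpr ⟨(mem_roundFix d pre_R v_y hnd a).mpr h,
            fun hm => haR0 ((PySem.Set.mem_add pre_R v_y a).mpr (Or.inl hm))⟩
  · intro ha
    obtain ⟨haM, haP⟩ := (hBmem a).mp ha
    have hrb : Rb d pre_R v_y a := (mem_roundFix d pre_R v_y hnd a).mp haM
    by_cases hav : a = v_y
    · exact hav ▸ List.mem_cons_self
    · rcases Rb_to_RchS d pre_R v_y hvy hrb with h | ⟨q, hq, hr⟩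
      · exact absurd h hav
      · have hmem : a ∈ reachFlat d (PySem.Set.add pre_R v_y) (d.getD v_y []) :=
          (mem_reachFlat d _ _ a).mpr (Or.inr ⟨q, hq, hr⟩)
        rw [hA] at hmem
        rcases List.mem_append.mp hmem with h | h
        · rcases (PySem.Set.mem_add pre_R v_y a).mp h with h | h
          exacts [absurd h haP, absurd h hav]
        · exact List.mem_cons_of_mem _ h

-- assembled equality in the genuine (well-formed two-vertex edge) case
theorem main_case (v_x v_y : String) (d_edges : List (String × List String))
    (pre_V : List String) (pre_A : List (String × String)) (pre_R : List String)
    (hnd0 : (d_edges.map Prod.fst).Nodup)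
    (hvx : (PySem.Dict.mk d_edges).contains v_x = true) :
    update_VAR [v_x, v_y] d_edges pre_V pre_A pre_R
      = update_VAR_alt [v_x, v_y] d_edges pre_V pre_A pre_R := by
  have hA : update_VAR [v_x, v_y] d_edges pre_V pre_A pre_R
      = (((PySem.Dict.mk d_edges).modify v_x [] (fun s => PySem.Set.add s v_y)).items,
         PySem.Set.add (PySem.Set.add pre_V v_x) v_y,
         PySem.Set.add pre_A (v_x, v_y),
         if PySem.Set.contains pre_R v_x && !(PySem.Set.contains pre_R v_y) then
           PySem.List.sorted (bfsLayers ((PySem.Dict.mk d_edges).modify v_x [] (fun s => PySem.Set.add s v_y))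
             (PySem.Set.add pre_R v_y)
             (((PySem.Dict.mk d_edges).modify v_x [] (fun s => PySem.Set.add s v_y)).getD v_y []))
             (fun x => x) false
         else pre_R) := rfl
  have hB : update_VAR_alt [v_x, v_y] d_edges pre_V pre_A pre_R
      = (((PySem.Dict.mk d_edges).modify v_x [] (fun s => PySem.Set.add s v_y)).items,
         PySem.Set.union pre_V [v_x, v_y],
         PySem.Set.union pre_A [(v_x, v_y)],
         if PySem.Set.contains pre_R v_x && !(PySem.Set.contains pre_R v_y) then
           PySem.List.sorted (PySem.Set.union pre_R
             (roundFix ((PySem.Dict.mk d_edges).modify v_x [] (fun s => PySem.Set.add s v_y)) pre_R [v_y]))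
             (fun x => x) false
         else pre_R) := rfl
  rw [hA, hB]
  simp only [Prod.mk.injEq]
  refine ⟨by first | rfl | trivial, ?_, ?_, ?_⟩
  · show PySem.Set.add (PySem.Set.add pre_V v_x) v_y = PySem.Set.union pre_V [v_x, v_y]
    simp [PySem.Set.union, PySem.Set.update]
  · show PySem.Set.add pre_A (v_x, v_y) = PySem.Set.union pre_A [(v_x, v_y)]
    simp [PySem.Set.union, PySem.Set.update]
  · by_cases hg : (PySem.Set.contains pre_R v_x && !(PySem.Set.contains pre_R v_y)) = true
    · rw [if_pos hg, if_pos hg]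
      have hvy : v_y ∉ pre_R := by
        simp only [Bool.and_eq_true, Bool.not_eq_true'] at hg
        intro hm
        rw [(PySem.Set.contains_iff pre_R v_y).mpr hm] at hg
        exact Bool.noConfusion hg.2
      have hnd : ((PySem.Dict.mk d_edges).modify v_x [] (fun s => PySem.Set.add s v_y)).keys.Nodup := by
        rw [PySem.Dict.keys_modify, PySem.Dict.keys_insert_of_contains]
        · exact hnd0
        · exact hvx
      exact nowR_eq _ pre_R v_y hvy hnd
    · rw [if_neg hg, if_neg hg]


-- ===== VERDICT (by name: the statement is the Claim_ definition above) =====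
theorem update_VAR_spec : Claim_equal_update_VAR := by
  intro edge d_edges pre_V pre_A pre_R _hdom hpre
  obtain ⟨hlen, hnd0, _hvx, _himp⟩ := hpre
  unfold Spec_update_VAR
  rcases edge with _ | ⟨v_x, tl⟩
  · simp at hlen
  rcases tl with _ | ⟨v_y, tl2⟩
  · simp at hlen
  rcases tl2 with _ | ⟨z, tl3⟩
  · exact main_case v_x v_y d_edges pre_V pre_A pre_R hnd0 _hvx
  · simp at hlen
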